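-- pv_equiv track=rewrite | github.com/HugeErick/BlackNeurons | src/number_analysis.py | is_catalan
-- ===== SOURCE A (Python) =====
-- def is_catalan(n):
--     # Catalan numbers: C_0 = 1, C_{k+1} = C_k * 2*(2k+1)/(k+2)
--     if n < 1:
--         return False
--     c = 1
--     k = 0
--     while c < n:
--         k += 1
--         c = c * 2 * (2 * k - 1) // (k + 1)
--     return c == n
-- ===== SOURCE B (Python) =====
-- def is_catalan(n):
--     # Build the Catalan sequence by Segner's convolution recurrence
--     # C_{k+1} = sum_{i=0..k} C_i * C_{k-i}; no division involved.
--     if n < 1: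
--         return False
--     cats = [1]
--     while cats[-1] < n:
--         cats.append(sum(a * b for a, b in zip(cats, reversed(cats))))
--     return cats[-1] == n
-- ===== Notes on version B (the rewrite author's own statement) =====
-- stated objective: alternative
-- what changed: B builds the whole Catalan sequence with Segner's convolution recurrence C_{k+1} = sum C_i*C_{k-i} over a growing list (no division at all) and compares the last generated term to n, instead of A's single running accumulator updated by the floor-division recurrence.
import Mathlib
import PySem

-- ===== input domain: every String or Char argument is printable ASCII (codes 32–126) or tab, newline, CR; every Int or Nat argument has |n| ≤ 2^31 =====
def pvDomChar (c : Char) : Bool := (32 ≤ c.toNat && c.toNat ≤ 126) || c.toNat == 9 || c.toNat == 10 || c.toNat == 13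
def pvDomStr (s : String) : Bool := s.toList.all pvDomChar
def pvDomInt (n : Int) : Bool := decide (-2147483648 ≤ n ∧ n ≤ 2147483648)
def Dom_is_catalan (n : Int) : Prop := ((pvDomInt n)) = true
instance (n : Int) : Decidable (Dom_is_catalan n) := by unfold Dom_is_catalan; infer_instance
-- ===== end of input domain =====

-- B builds the Catalan sequence as a growing list via Segner's convolution
-- C_{k+1} = sum_i C_i * C_{k-i} (no division), instead of A's single running
-- accumulator updated by the floor-division recurrence; objective: alternative.

-- ===== PORT A =====
-- A's while loop; fuel only makes the recursion total (64 iterations more than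
-- cover every n in Dom; on exhaustion the loop exits with the same 'c == n').
def isCatalanLoopA : Nat → Int → Int → Int → Bool
  | 0, _, c, n => c == n
  | fuel + 1, k, c, n =>
    if c < n then
      isCatalanLoopA fuel (k + 1) (PySem.Int.floordiv (c * 2 * (2 * (k + 1) - 1)) ((k + 1) + 1)) n
    else c == n

def is_catalan (n : Int) : Bool :=
  if n < 1 then false else isCatalanLoopA 64 0 1 n

-- ===== PORT B =====
-- sum(a * b for a, b in zip(cats, reversed(cats)))
def segnerConv (cats : List Int) : Int :=
  ((cats.zip cats.reverse).map (fun p => p.1 * p.2)).foldl (· + ·) 0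

-- cats[-1]; the list is nonempty at every call (it starts as a singleton and only grows).
def isCatalanLoopB : Nat → List Int → Int → Bool
  | 0, cats, n => cats.getLastD 1 == n
  | fuel + 1, cats, n =>
    if cats.getLastD 1 < n then
      isCatalanLoopB fuel (cats ++ [segnerConv cats]) n
    else cats.getLastD 1 == n

def is_catalan_alt (n : Int) : Bool :=
  if n < 1 then false else isCatalanLoopB 64 [1] n

-- ===== PRECONDITION & SPEC =====
def Spec_is_catalan (n : Int) (out : Bool) : Prop := out = is_catalan_alt n
instance (n : Int) (out : Bool) : Decidable (Spec_is_catalan n out) := by unfold Spec_is_catalan; infer_instance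

-- ===== CLAIM (what is proved, stated in full; the proofs are below) =====
def Claim_equal_is_catalan : Prop := ∀ (n : Int), Dom_is_catalan n → Spec_is_catalan n (is_catalan n)

-- ===== LEMMAS AND PROOFS =====

-- B's loop state after k expansions: the first k+1 Catalan numbers.
def catList (k : Nat) : List Int := (List.range (k + 1)).map (fun i => (catalan i : Int))

theorem catList_succ (k : Nat) :
    catList (k + 1) = catList k ++ [(catalan (k + 1) : Int)] := by
  simp [catList, List.range_succ]

theorem catList_last (k : Nat) : (catList k).getLastD 1 = (catalan k : Int) := by
  rw [show catList k = (List.range k).map (fun i => (catalan i : Int)) ++ [(catalan k : Int)] by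
    simp [catList, List.range_succ]]
  simp

-- Segner's convolution on the first k+1 Catalan numbers yields C_{k+1}.
theorem segnerConv_catList (k : Nat) : segnerConv (catList k) = (catalan (k + 1) : Int) := by
  have hlen : (catList k).length = k + 1 := by simp [catList]
  have hmap : ((catList k).zip (catList k).reverse).map (fun p => p.1 * p.2)
      = (List.range (k + 1)).map (fun i => (catalan i : Int) * (catalan (k - i) : Int)) := by
    apply List.ext_getElem
    · simp [hlen]
    · intro i h1 h2
      simp only [List.getElem_map, List.getElem_zip, List.getElem_reverse, List.getElem_range]
      have hi : i < k + 1 := by simpa [hlen] using h2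
      simp only [catList, List.getElem_map, List.getElem_range, List.length_map,
        List.length_range]
      rw [show k + 1 - 1 - i = k - i from by omega]
  have hsum : ((List.range (k + 1)).map (fun i => (catalan i : Int) * (catalan (k - i) : Int))).sum
      = ∑ i ∈ Finset.range (k + 1), (catalan i : Int) * (catalan (k - i) : Int) := rfl
  have hcat : (catalan (k + 1) : Int)
      = ∑ i ∈ Finset.range (k + 1), (catalan i : Int) * (catalan (k - i) : Int) := by
    rw [catalan_succ' k, Finset.Nat.sum_antidiagonal_eq_sum_range_succ (fun x y => catalan x * catalan y) k]
    push_cast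
    rfl
  rw [segnerConv, ← List.sum_eq_foldl, hmap, hsum, hcat]

-- The Catalan recurrence A uses: (k+2) * C_{k+1} = 2 * (2k+1) * C_k.
theorem catalan_rec (k : Nat) :
    (k + 2) * catalan (k + 1) = 2 * (2 * k + 1) * catalan k := by
  have h1 : (k + 2) * catalan (k + 1) = Nat.centralBinom (k + 1) :=
    succ_mul_catalan_eq_centralBinom (k + 1)
  have h2 : (k + 1) * Nat.centralBinom (k + 1) = 2 * (2 * k + 1) * Nat.centralBinom k :=
    Nat.succ_mul_centralBinom_succ k
  have h3 : (k + 1) * catalan k = Nat.centralBinom k :=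
    succ_mul_catalan_eq_centralBinom k
  apply Nat.eq_of_mul_eq_mul_left (Nat.succ_pos k)
  calc (k + 1) * ((k + 2) * catalan (k + 1))
      = (k + 1) * Nat.centralBinom (k + 1) := by rw [h1]
    _ = 2 * (2 * k + 1) * Nat.centralBinom k := h2
    _ = 2 * (2 * k + 1) * ((k + 1) * catalan k) := by rw [h3]
    _ = (k + 1) * (2 * (2 * k + 1) * catalan k) := by ring

-- A's floor-division update sends C_k to C_{k+1}.
theorem step_eq (k : Nat) :
    PySem.Int.floordiv ((catalan k : Int) * 2 * (2 * ((k : Int) + 1) - 1)) (((k : Int) + 1) + 1)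
      = (catalan (k + 1) : Int) := by
  have hn : (catalan k * 2 * (2 * k + 1)) / (k + 2) = catalan (k + 1) := by
    have h : catalan k * 2 * (2 * k + 1) = (k + 2) * catalan (k + 1) := by
      rw [catalan_rec k]; ring
    rw [h, Nat.mul_div_cancel_left _ (by omega)]
  have e1 : (catalan k : Int) * 2 * (2 * ((k : Int) + 1) - 1)
      = ((catalan k * 2 * (2 * k + 1) : Nat) : Int) := by push_cast; ring
  have e2 : ((k : Int) + 1) + 1 = ((k + 2 : Nat) : Int) := by push_cast; ring
  rw [e1, e2, PySem.Int.floordiv_natCast, hn]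

-- The two loops agree when A carries C_k and B carries the list C_0..C_k.
theorem loops_eq (fuel k : Nat) (n : Int) :
    isCatalanLoopA fuel (k : Int) (catalan k : Int) n
      = isCatalanLoopB fuel (catList k) n := by
  induction fuel generalizing k with
  | zero =>
    simp only [isCatalanLoopA, isCatalanLoopB]
    rw [catList_last]
  | succ fuel ih =>
    simp only [isCatalanLoopA, isCatalanLoopB, catList_last]
    by_cases h : (catalan k : Int) < n
    · simp only [if_pos h]
      rw [step_eq k, segnerConv_catList k, ← catList_succ k,
        show (k : Int) + 1 = ((k + 1 : Nat) : Int) by push_cast; ring]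
      exact ih (k + 1)
    · simp only [if_neg h]

-- ===== VERDICT (by name: the statement is the Claim_ definition above) =====
theorem is_catalan_spec : Claim_equal_is_catalan := by
  intro n _
  unfold Spec_is_catalan is_catalan is_catalan_alt
  split
  · rfl
  · simpa [catalan_zero, catList] using loops_eq 64 0 n
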